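-- pv_equiv track=rewrite | github.com/QSiming/DSC40B_SP26_STARTERCODE | problems/written/brute_force/minimize_ell_theta/v01/include-solution/minimize_ell_theta.py | minimize_ell_sorted
-- ===== SOURCE A (Python) =====
-- def minimize_ell_sorted(data, color):
--     min_theta = data[0]
--     min_loss = 100000
--     for i in data:
--         red = 0
--         blue = 0
--         for j in range(len(data)):
--             if data[j] <= i and color[j] == "red":
--                 red += 1
--             elif data[j] > i and color[j] == "blue":
--                 blue += 1
--         if red + blue < min_loss:
--             min_loss = red + blue
--             min_theta = i
--     return min_theta
-- ===== SOURCE B (Python) =====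
-- def minimize_ell_sorted(data, color):
--     pairs = list(zip(data, color))
--     blue_total = 0
--     wt = {}
--     for v, c in pairs:
--         if c == "blue":
--             blue_total += 1
--         wt[v] = wt.get(v, 0) + (1 if c == "red" else (-1 if c == "blue" else 0))
--     cum = {}
--     s = 0
--     for v in sorted(wt):
--         s += wt[v]
--         cum[v] = s
--     min_theta = data[0]
--     min_loss = 100000
--     for v in data:
--         loss = blue_total + cum.get(v, 0)
--         if loss < min_loss:
--             min_loss = loss
--             min_theta = v
--     return min_theta
-- ===== Notes on version B (the rewrite author's own statement) =====
-- stated objective: faster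
-- what changed: Replaces A's O(n) rescan of all points for every candidate threshold by a single counting pass (per-value weight sums and the total blue count) followed by a prefix-sum over the sorted distinct values, so each candidate's loss is an O(1) lookup.
import Mathlib
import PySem

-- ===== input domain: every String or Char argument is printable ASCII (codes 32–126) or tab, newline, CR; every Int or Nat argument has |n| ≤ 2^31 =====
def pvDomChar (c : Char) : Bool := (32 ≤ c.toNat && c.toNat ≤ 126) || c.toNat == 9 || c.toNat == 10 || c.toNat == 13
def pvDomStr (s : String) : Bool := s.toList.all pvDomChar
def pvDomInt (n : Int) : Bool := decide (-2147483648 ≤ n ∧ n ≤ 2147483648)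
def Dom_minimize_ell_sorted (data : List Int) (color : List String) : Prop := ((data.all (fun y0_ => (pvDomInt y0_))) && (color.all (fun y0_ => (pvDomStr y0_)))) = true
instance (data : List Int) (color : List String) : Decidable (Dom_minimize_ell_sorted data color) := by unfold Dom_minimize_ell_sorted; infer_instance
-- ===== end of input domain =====

-- B replaces A's quadratic per-threshold rescans by one counting pass plus a sorted prefix-sum
-- table of per-value loss deltas, looked up in O(1) per candidate (objective: faster, O(n log n) vs O(n^2)).

-- ===== PORT A =====
def minimize_ell_sorted (data : List Int) (color : List String) : Int :=
  (data.foldl (fun (st : Int × Int) i =>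
      let rb := (PySem.List.pyRange 0 (data.length : Int) 1).foldl
        (fun (rb : Int × Int) j =>
          if PySem.List.pyGetD data j 0 ≤ i ∧ PySem.List.pyGetD color j "" = "red" then
            (rb.1 + 1, rb.2)
          else if PySem.List.pyGetD data j 0 > i ∧ PySem.List.pyGetD color j "" = "blue" then
            (rb.1, rb.2 + 1)
          else rb) (0, 0)
      if rb.1 + rb.2 < st.2 then (i, rb.1 + rb.2) else st)
    (PySem.List.pyGetD data 0 0, 100000)).1

-- ===== PORT B =====
-- weight of one point: +1 if red (counted when value ≤ θ), -1 if blue (cancels one blue-above), else 0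
def pvWeight (c : String) : Int := if c = "red" then 1 else if c = "blue" then -1 else 0

def minimize_ell_sorted_alt (data : List Int) (color : List String) : Int :=
  let pairs := data.zip color
  let wb := pairs.foldl
    (fun (st : PySem.Dict Int Int × Int) p =>
      (st.1.modify p.1 0 (fun x => x + pvWeight p.2),
       if p.2 = "blue" then st.2 + 1 else st.2))
    (PySem.Dict.empty, 0)
  let wt := wb.1
  let blue_total := wb.2
  let cs := (PySem.List.sorted wt.keys (fun x => x) false).foldl
    (fun (st : PySem.Dict Int Int × Int) v =>
      (st.1.insert v (st.2 + wt.getD v 0), st.2 + wt.getD v 0))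
    (PySem.Dict.empty, 0)
  let cum := cs.1
  (data.foldl (fun (st : Int × Int) v =>
      if blue_total + cum.getD v 0 < st.2 then (v, blue_total + cum.getD v 0) else st)
    (PySem.List.pyGetD data 0 0, 100000)).1

-- ===== PRECONDITION & SPEC =====
-- A raises IndexError on empty data (data[0]) and when color is shorter than data (color[j]); Pre_ excludes exactly those.
def Pre_minimize_ell_sorted (data : List Int) (color : List String) : Prop :=
  data ≠ [] ∧ data.length ≤ color.length
instance (data : List Int) (color : List String) : Decidable (Pre_minimize_ell_sorted data color) := by
  unfold Pre_minimize_ell_sorted; infer_instance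

def pvWitness_minimize_ell_sorted : List Int × List String := ([1, 2], ["red", "blue"])

def Spec_minimize_ell_sorted (data : List Int) (color : List String) (out : Int) : Prop := out = minimize_ell_sorted_alt data color
instance (data : List Int) (color : List String) (out : Int) : Decidable (Spec_minimize_ell_sorted data color out) := by unfold Spec_minimize_ell_sorted; infer_instance

-- ===== CLAIM (what is proved, stated in full; the proofs are below) =====
def Claim_equal_minimize_ell_sorted : Prop := ∀ (data : List Int) (color : List String), Dom_minimize_ell_sorted data color → Pre_minimize_ell_sorted data color → Spec_minimize_ell_sorted data color (minimize_ell_sorted data color)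

-- ===== LEMMAS AND PROOFS =====

-- a sum of point indicators over a Nodup list
theorem pv_sum_indicator (x : Int) (c : Int) :
    ∀ (l : List Int), l.Nodup →
      (l.map (fun u => if x = u then c else 0)).sum = if x ∈ l then c else 0 := by
  intro l
  induction l with
  | nil => simp
  | cons a t ih =>
    intro hnd
    have hnd' := hnd.of_cons
    have hna : a ∉ t := (List.nodup_cons.mp hnd).1
    by_cases hxa : x = a
    · subst hxa
      simp [ih hnd', hna]
    · simp [hxa, ih hnd', List.mem_cons]

-- grouping: summing per-value weight totals over the distinct values ≤ v equals
-- summing weights over the points of value ≤ v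
theorem pv_group_sum (v : Int) :
    ∀ (pairs : List (Int × String)) (ks : List Int), ks.Nodup →
      (∀ p ∈ pairs, p.1 ∈ ks) →
      ((ks.filter (fun u => decide (u ≤ v))).map
          (fun u => ((pairs.filter (fun p => decide (p.1 = u))).map (fun p => pvWeight p.2)).sum)).sum
        = ((pairs.filter (fun p => decide (p.1 ≤ v))).map (fun p => pvWeight p.2)).sum := by
  intro pairs
  induction pairs with
  | nil => intro ks _ _; simp
  | cons p rest ih =>
    intro ks hnd hcov
    have hp1 : p.1 ∈ ks := hcov p (by simp)
    have hcov' : ∀ q ∈ rest, q.1 ∈ ks := fun q hq => hcov q (by simp [hq])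
    have hnd' : (ks.filter (fun u => decide (u ≤ v))).Nodup := hnd.filter _
    have hsplit :
        ((ks.filter (fun u => decide (u ≤ v))).map
            (fun u => (((p :: rest).filter (fun q => decide (q.1 = u))).map (fun q => pvWeight q.2)).sum)).sum
          = ((ks.filter (fun u => decide (u ≤ v))).map
              (fun u => (if p.1 = u then pvWeight p.2 else 0)
                + ((rest.filter (fun q => decide (q.1 = u))).map (fun q => pvWeight q.2)).sum)).sum := by
      congr 1
      apply List.map_congr_left
      intro u _
      by_cases h : p.1 = u <;> simp [List.filter_cons, h]
    rw [hsplit, PySem.List.sum_map_add_int, ih ks hnd hcov',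
        pv_sum_indicator p.1 (pvWeight p.2) _ hnd']
    have hmem : p.1 ∈ ks.filter (fun u => decide (u ≤ v)) ↔ p.1 ≤ v := by
      simp [List.mem_filter, hp1]
    by_cases hle : p.1 ≤ v
    · simp [List.filter_cons, hle, hmem.mpr hle]
    · have : p.1 ∉ ks.filter (fun u => decide (u ≤ v)) := fun h => hle (hmem.mp h)
      simp [List.filter_cons, hle, this]

-- the weight-accumulating dict lookup
theorem pv_wt_getD (v : Int) :
    ∀ (pairs : List (Int × String)) (d : PySem.Dict Int Int),
      (pairs.foldl (fun d p => d.modify p.1 0 (fun x => x + pvWeight p.2)) d).getD v 0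
        = d.getD v 0 + ((pairs.filter (fun p => decide (p.1 = v))).map (fun p => pvWeight p.2)).sum := by
  intro pairs
  induction pairs with
  | nil => intro d; simp
  | cons p rest ih =>
    intro d
    rw [List.foldl_cons, ih, PySem.Dict.getD_modify]
    by_cases h : v = p.1
    · subst h; simp [List.filter_cons]; ring
    · have h' : ¬ p.1 = v := fun hh => h hh.symm
      simp [h, List.filter_cons, h']

-- the prefix-sum fold leaves values at absent keys alone …
theorem pv_cum_notmem (f : Int → Int) (v : Int) :
    ∀ (ks : List Int) (d : PySem.Dict Int Int) (s : Int), v ∉ ks →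
      ((ks.foldl (fun (st : PySem.Dict Int Int × Int) u => (st.1.insert u (st.2 + f u), st.2 + f u)) (d, s)).1).getD v 0
        = d.getD v 0 := by
  intro ks
  induction ks with
  | nil => intro d s _; simp
  | cons k rest ih =>
    intro d s hv
    have hvk : v ≠ k := fun h => hv (by simp [h])
    have hvr : v ∉ rest := fun h => hv (by simp [h])
    rw [List.foldl_cons, ih _ _ hvr, PySem.Dict.getD_insert_of_ne _ _ _ hvk]

-- … and stores, at each key, the running prefix sum over all keys ≤ that key
theorem pv_cum_getD (f : Int → Int) (v : Int) :
    ∀ (ks : List Int), ks.Pairwise (· < ·) →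
      ∀ (d : PySem.Dict Int Int) (s : Int), v ∈ ks →
      ((ks.foldl (fun (st : PySem.Dict Int Int × Int) u => (st.1.insert u (st.2 + f u), st.2 + f u)) (d, s)).1).getD v 0
        = s + ((ks.filter (fun u => decide (u ≤ v))).map f).sum := by
  intro ks
  induction ks with
  | nil => intro _ d s hv; simp at hv
  | cons k rest ih =>
    intro hp d s hv
    have hlt : ∀ x ∈ rest, k < x := fun x hx => (List.pairwise_cons.mp hp).1 x hx
    have hp' : rest.Pairwise (· < ·) := (List.pairwise_cons.mp hp).2
    rw [List.foldl_cons]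
    rcases List.mem_cons.mp hv with hvk | hvr
    · subst hvk
      have hnr : v ∉ rest := fun h => lt_irrefl v (hlt v h)
      rw [pv_cum_notmem f v rest _ _ hnr, PySem.Dict.getD_insert_self]
      have hfe : rest.filter (fun u => decide (u ≤ v)) = [] := by
        apply List.filter_eq_nil_iff.mpr
        intro x hx
        simp [not_le.mpr (hlt x hx)]
      simp [List.filter_cons, hfe]
    · have hkv : k ≤ v := le_of_lt (hlt v hvr)
      rw [ih hp' _ _ hvr]
      simp [List.filter_cons, hkv]
      ring
-- an index loop over range(len(data)) reading data[j], color[j] is a loop over zip(data, color)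
theorem pv_range_take {σ : Type} (f : σ → Int × String → σ) (data : List Int)
    (color : List String) (h : data.length ≤ color.length) (init : σ) :
    ∀ (n : Nat), n ≤ data.length →
      (List.range n).foldl (fun s k => f s (data.getD k 0, color.getD k "")) init
        = ((data.zip color).take n).foldl f init := by
  intro n
  induction n with
  | zero => intro _; simp
  | succ m ih =>
    intro hm
    have hm' : m ≤ data.length := Nat.le_of_succ_le hm
    have hmd : m < data.length := hm
    have hmc : m < color.length := lt_of_lt_of_le hmd h
    have hz : m < (data.zip color).length := by
      simp [List.length_zip]; omega
    rw [List.range_succ, List.foldl_append, ih hm', List.take_succ]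
    have : (data.zip color)[m]? = some (data[m], color[m]) := by
      rw [List.getElem?_eq_getElem hz]
      simp [List.getElem_zip]
    rw [this]
    simp [List.getElem?_eq_getElem hmd, List.getElem?_eq_getElem hmc]

-- value of A's inner counting loop over the zipped points
theorem pv_inner_sum (i : Int) :
    ∀ (pairs : List (Int × String)) (a b : Int),
      (pairs.foldl (fun (rb : Int × Int) p =>
          if p.1 ≤ i ∧ p.2 = "red" then (rb.1 + 1, rb.2)
          else if p.1 > i ∧ p.2 = "blue" then (rb.1, rb.2 + 1)
          else rb) (a, b)).1
      + (pairs.foldl (fun (rb : Int × Int) p =>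
          if p.1 ≤ i ∧ p.2 = "red" then (rb.1 + 1, rb.2)
          else if p.1 > i ∧ p.2 = "blue" then (rb.1, rb.2 + 1)
          else rb) (a, b)).2
      = a + b + (pairs.countP (fun p => decide (p.2 = "blue")) : Int)
        + ((pairs.filter (fun p => decide (p.1 ≤ i))).map (fun p => pvWeight p.2)).sum := by
  intro pairs
  induction pairs with
  | nil => intro a b; simp
  | cons p rest ih =>
    intro a b
    rw [List.foldl_cons]
    by_cases h1 : p.1 ≤ i
    · by_cases hr : p.2 = "red"
      · have hb : ¬ p.2 = "blue" := by rw [hr]; decide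
        simp only [h1, hr, and_true, if_pos (And.intro h1 hr)]
        rw [ih]
        simp [List.countP_cons, List.filter_cons, h1, hb, hr, pvWeight]
        ring
      · have hni : ¬ (p.1 > i ∧ p.2 = "blue") := fun hc => (not_lt.mpr h1) hc.1
        rw [if_neg (fun hc => hr hc.2), if_neg hni, ih]
        by_cases hb : p.2 = "blue"
        · simp [List.countP_cons, List.filter_cons, h1, hb, hr, pvWeight]
          ring
        · simp [List.countP_cons, List.filter_cons, h1, hb, hr, pvWeight]
    · have hni : ¬ (p.1 ≤ i ∧ p.2 = "red") := fun hc => h1 hc.1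
      rw [if_neg hni]
      by_cases hb : p.2 = "blue"
      · rw [if_pos (And.intro (not_le.mp h1) hb), ih]
        simp [List.countP_cons, List.filter_cons, h1, hb]
        ring
      · rw [if_neg (fun hc => hb hc.2), ih]
        simp [List.countP_cons, List.filter_cons, h1, hb]

theorem pv_pairwise_lt (l : List Int) (h1 : l.Pairwise (· ≤ ·)) (h2 : l.Nodup) :
    l.Pairwise (· < ·) :=
  (h1.and h2).imp (fun h => lt_of_le_of_ne h.1 h.2)

-- the two programs compute, for each candidate theta, the same loss
theorem pv_loss_eq (data : List Int) (color : List String)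
    (h : data.length ≤ color.length) (i : Int) (hi : i ∈ data) :
    (let pairs := data.zip color
     let wt := pairs.foldl (fun d p => d.modify p.1 0 (fun x => x + pvWeight p.2)) PySem.Dict.empty
     let ks := PySem.List.sorted wt.keys (fun x => x) false
     ((pairs.countP (fun p => decide (p.2 = "blue")) : Int)
       + ((ks.foldl (fun (st : PySem.Dict Int Int × Int) u =>
             (st.1.insert u (st.2 + wt.getD u 0), st.2 + wt.getD u 0)) (PySem.Dict.empty, 0)).1).getD i 0)
      = (pairs.countP (fun p => decide (p.2 = "blue")) : Int)
        + ((pairs.filter (fun p => decide (p.1 ≤ i))).map (fun p => pvWeight p.2)).sum) := by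
  intro pairs wt ks
  have hkeys : wt.keys = PySem.Set.ofList (pairs.map (fun p => p.1)) := by
    have := PySem.Dict.keys_foldl_modify_key pairs (fun p => p.1) 0
      (fun _ p x => x + pvWeight p.2) PySem.Dict.empty
    simpa [wt, PySem.Dict.keys_empty] using this
  have hknd : wt.keys.Nodup := by
    rw [hkeys]; exact PySem.Set.nodup_ofList _
  have hperm : ks.Perm wt.keys := PySem.List.sorted_perm wt.keys (fun x => x) false
  have hksnd : ks.Nodup := hperm.nodup_iff.mpr hknd
  have hksle : ks.Pairwise (· ≤ ·) := PySem.List.sorted_pairwise wt.keys (fun x => x)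
  have hkslt : ks.Pairwise (· < ·) := pv_pairwise_lt ks hksle hksnd
  have hfst : pairs.map (fun p => p.1) = data := List.map_fst_zip h
  have hi' : i ∈ ks := by
    rw [hperm.mem_iff, hkeys, PySem.Set.mem_ofList, hfst]; exact hi
  have hcov : ∀ p ∈ pairs, p.1 ∈ ks := by
    intro p hp
    rw [hperm.mem_iff, hkeys, PySem.Set.mem_ofList]
    exact List.mem_map_of_mem hp
  rw [pv_cum_getD _ i ks hkslt _ 0 hi', zero_add]
  congr 1
  have hwt : ∀ u, wt.getD u 0
      = ((pairs.filter (fun p => decide (p.1 = u))).map (fun p => pvWeight p.2)).sum := by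
    intro u
    rw [pv_wt_getD u pairs PySem.Dict.empty, PySem.Dict.getD_empty, zero_add]
  calc ((ks.filter (fun u => decide (u ≤ i))).map (fun u => wt.getD u 0)).sum
      = ((ks.filter (fun u => decide (u ≤ i))).map
          (fun u => ((pairs.filter (fun p => decide (p.1 = u))).map (fun p => pvWeight p.2)).sum)).sum := by
        congr 1; exact List.map_congr_left (fun u _ => hwt u)
    _ = ((pairs.filter (fun p => decide (p.1 ≤ i))).map (fun p => pvWeight p.2)).sum :=
        pv_group_sum i pairs ks hksnd hcov

-- ===== VERDICT (by name: the statement is the Claim_ definition above) =====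
theorem minimize_ell_sorted_spec : Claim_equal_minimize_ell_sorted := by
  intro data color _hdom hpre
  obtain ⟨hne, hlen⟩ := hpre
  unfold Spec_minimize_ell_sorted minimize_ell_sorted minimize_ell_sorted_alt
  dsimp only
  rw [PySem.List.foldl_prod_mk
    (f := fun (d : PySem.Dict Int Int) (p : Int × String) => d.modify p.1 0 (fun x => x + pvWeight p.2))
    (g := fun (b : Int) (p : Int × String) => if p.2 = "blue" then b + 1 else b)]
  dsimp only
  rw [PySem.List.foldl_ite_add_one (fun p => p.2 = "blue") (data.zip color) 0, zero_add]
  apply congrArg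
  apply PySem.List.foldl_congr_mem
  intro st i hi
  have hfold :
      (PySem.List.pyRange 0 (data.length : Int) 1).foldl
          (fun (rb : Int × Int) j =>
            if PySem.List.pyGetD data j 0 ≤ i ∧ PySem.List.pyGetD color j "" = "red" then (rb.1 + 1, rb.2)
            else if PySem.List.pyGetD data j 0 > i ∧ PySem.List.pyGetD color j "" = "blue" then (rb.1, rb.2 + 1)
            else rb) (0, 0)
        = (data.zip color).foldl
            (fun (rb : Int × Int) (p : Int × String) =>
              if p.1 ≤ i ∧ p.2 = "red" then (rb.1 + 1, rb.2)
              else if p.1 > i ∧ p.2 = "blue" then (rb.1, rb.2 + 1)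
              else rb) (0, 0) := by
    have h2 := pv_range_take
      (f := fun (rb : Int × Int) (p : Int × String) =>
        if p.1 ≤ i ∧ p.2 = "red" then (rb.1 + 1, rb.2)
        else if p.1 > i ∧ p.2 = "blue" then (rb.1, rb.2 + 1)
        else rb) data color hlen (0, 0) data.length le_rfl
    rw [List.take_of_length_le (by simp)] at h2
    rw [PySem.List.pyRange_zero_nat, List.foldl_map]
    simpa [PySem.List.pyGetD_natCast] using h2
  rw [hfold, pv_inner_sum i (data.zip color) 0 0]
  have hloss := pv_loss_eq data color hlen i hi
  simp only [] at hloss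
  simp only [zero_add]
  rw [← hloss]
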